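-- pv_equiv track=rewrite | github.com/sky-vino/Axessia- | crawl_orchestrator.py | calculate_eaa_risk
-- ===== SOURCE A (Python) =====
-- def calculate_eaa_risk(rules):
--     for r in rules:
--         if (
--             r.get("level") in ["A", "AA"]
--             and r.get("severity") in ["critical", "serious"]
--             and r.get("status") == "fail"
--         ):
--             return "High"
--
--     for r in rules:
--         if (
--             r.get("level") in ["A", "AA"]
--             and r.get("status") in ["manual", "assisted"]
--         ):
--             return "Medium"
--
--     return "Low"
-- ===== SOURCE B (Python) =====
-- def calculate_eaa_risk(rules):
--     medium_found = False
--     for r in rules: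
--         if r.get("level") in ["A", "AA"]:
--             if r.get("severity") in ["critical", "serious"] and r.get("status") == "fail":
--                 return "High"
--             if r.get("status") in ["manual", "assisted"]:
--                 medium_found = True
--     return "Medium" if medium_found else "Low"
-- ===== Notes on version B (the rewrite author's own statement) =====
-- stated objective: alternative
-- what changed: Replaced the two sequential early-return scans with a single pass that returns 'High' immediately and tracks a medium_found flag, deciding Medium/Low after the loop.
import Mathlib
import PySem

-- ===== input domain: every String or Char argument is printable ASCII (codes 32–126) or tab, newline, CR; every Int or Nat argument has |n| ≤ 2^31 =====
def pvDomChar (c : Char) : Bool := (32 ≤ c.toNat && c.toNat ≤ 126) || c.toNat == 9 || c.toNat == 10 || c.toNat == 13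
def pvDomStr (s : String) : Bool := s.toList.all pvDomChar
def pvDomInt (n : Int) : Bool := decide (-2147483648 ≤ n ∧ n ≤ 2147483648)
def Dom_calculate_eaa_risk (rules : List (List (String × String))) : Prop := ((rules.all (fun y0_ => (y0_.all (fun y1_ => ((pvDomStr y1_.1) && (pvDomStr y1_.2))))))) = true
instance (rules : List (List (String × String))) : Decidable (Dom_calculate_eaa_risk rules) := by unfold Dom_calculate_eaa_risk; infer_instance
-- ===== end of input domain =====

-- B replaces A's two sequential scans by a single pass with a medium_found flag (alternative decomposition, same result).

-- ===== PORT A =====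
-- r.get(k) on the dict r (association list, first match wins)
def pvGet : List (String × String) → String → Option String
  | [], _ => none
  | (k, v) :: t, q => if k == q then some v else pvGet t q

-- first loop of A: early-return "High"
def pvA_loop1 : List (List (String × String)) → Option String
  | [] => none
  | r :: t =>
      if (pvGet r "level" == some "A" || pvGet r "level" == some "AA")
          && (pvGet r "severity" == some "critical" || pvGet r "severity" == some "serious")
          && (pvGet r "status" == some "fail") then some "High"
      else pvA_loop1 t

-- second loop of A: early-return "Medium"
def pvA_loop2 : List (List (String × String)) → Option String
  | [] => none
  | r :: t =>
      if (pvGet r "level" == some "A" || pvGet r "level" == some "AA")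
          && (pvGet r "status" == some "manual" || pvGet r "status" == some "assisted") then some "Medium"
      else pvA_loop2 t

def calculate_eaa_risk (rules : List (List (String × String))) : String :=
  match pvA_loop1 rules with
  | some s => s
  | none =>
      match pvA_loop2 rules with
      | some s => s
      | none => "Low"

-- ===== PORT B =====
-- single pass carrying the medium_found flag
def pvB_go : List (List (String × String)) → Bool → String
  | [], medium_found => if medium_found then "Medium" else "Low"
  | r :: t, medium_found =>
      if pvGet r "level" == some "A" || pvGet r "level" == some "AA" then
        if (pvGet r "severity" == some "critical" || pvGet r "severity" == some "serious")
            && (pvGet r "status" == some "fail") then "High"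
        else if pvGet r "status" == some "manual" || pvGet r "status" == some "assisted" then
          pvB_go t true
        else pvB_go t medium_found
      else pvB_go t medium_found

def calculate_eaa_risk_alt (rules : List (List (String × String))) : String :=
  pvB_go rules false

-- ===== PRECONDITION & SPEC =====
def Spec_calculate_eaa_risk (rules : List (List (String × String))) (out : String) : Prop := out = calculate_eaa_risk_alt rules
instance (rules : List (List (String × String))) (out : String) : Decidable (Spec_calculate_eaa_risk rules out) := by unfold Spec_calculate_eaa_risk; infer_instance

-- ===== CLAIM (what is proved, stated in full; the proofs are below) =====
def Claim_equal_calculate_eaa_risk : Prop := ∀ (rules : List (List (String × String))), Dom_calculate_eaa_risk rules → Spec_calculate_eaa_risk rules (calculate_eaa_risk rules)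

-- ===== LEMMAS AND PROOFS =====

-- the one-pass loop with flag m computes: High if loop1 hits, else Medium if m or loop2 hits, else Low
theorem pvB_go_eq : ∀ (t : List (List (String × String))) (m : Bool),
    pvB_go t m =
      match pvA_loop1 t with
      | some s => s
      | none => if m then "Medium" else match pvA_loop2 t with | some s => s | none => "Low" := by
  intro t
  induction t with
  | nil => intro m; cases m <;> simp [pvB_go, pvA_loop1, pvA_loop2]
  | cons r t ih =>
      intro m
      by_cases hL : (pvGet r "level" == some "A" || pvGet r "level" == some "AA") = true
      · by_cases hS : ((pvGet r "severity" == some "critical" || pvGet r "severity" == some "serious")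
            && (pvGet r "status" == some "fail")) = true
        · simp [pvB_go, pvA_loop1, hL, hS]
        · by_cases hM : (pvGet r "status" == some "manual" || pvGet r "status" == some "assisted") = true
          · simp [pvB_go, pvA_loop1, pvA_loop2, hL, hS, hM, ih]
          · simp [pvB_go, pvA_loop1, pvA_loop2, hL, hS, hM, ih]
      · simp [pvB_go, pvA_loop1, pvA_loop2, hL, ih]

-- ===== VERDICT (by name: the statement is the Claim_ definition above) =====
theorem calculate_eaa_risk_spec : Claim_equal_calculate_eaa_risk := by
  intro rules _
  unfold Spec_calculate_eaa_risk calculate_eaa_risk calculate_eaa_risk_alt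
  rw [pvB_go_eq]
  simp
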